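-- pv_equiv track=rewrite | github.com/young050317/ppp2025 | hw10/data_rain.py | rain_events
-- ===== SOURCE A (Python) =====
-- def rain_events(rainfalls):
--     sum=[]
--     c_days_amount=0
--     for rain in rainfalls:
--         if rain > 0:
--             c_days_amount += rain
--
--         else:
--             if c_days_amount > 0:
--                 sum.append(c_days_amount)
--                 c_days_amount = 0
--     if c_days_amount > 0:
--         sum.append(c_days_amount)
--     return sum
-- ===== SOURCE B (Python) =====
-- def rain_events(rainfalls):
--     # Two-pointer run scan: find each maximal positive run and sum its slice.
--     result = []
--     i = 0
--     n = len(rainfalls)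
--     while i < n:
--         if rainfalls[i] > 0:
--             j = i
--             while j < n and rainfalls[j] > 0:
--                 j += 1
--             result.append(sum(rainfalls[i:j]))
--             i = j
--         else:
--             i += 1
--     return result
-- ===== Notes on version B (the rewrite author's own statement) =====
-- stated objective: alternative
-- what changed: Replaces A's accumulator-and-reset state machine with a two-pointer run scan that locates each maximal positive run and sums its slice directly.
import Mathlib
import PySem

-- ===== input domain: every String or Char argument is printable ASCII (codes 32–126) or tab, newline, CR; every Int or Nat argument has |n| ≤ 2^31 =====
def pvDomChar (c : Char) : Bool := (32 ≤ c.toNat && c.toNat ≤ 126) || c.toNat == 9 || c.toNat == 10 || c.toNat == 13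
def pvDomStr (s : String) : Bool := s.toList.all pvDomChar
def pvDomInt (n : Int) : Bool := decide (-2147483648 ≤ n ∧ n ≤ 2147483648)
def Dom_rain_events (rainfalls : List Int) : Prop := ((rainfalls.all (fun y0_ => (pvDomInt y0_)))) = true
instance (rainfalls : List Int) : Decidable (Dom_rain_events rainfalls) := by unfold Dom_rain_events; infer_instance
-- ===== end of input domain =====

-- B replaces A's accumulator-and-reset state machine with a scan that extracts each
-- maximal positive run and sums it directly (alternative decomposition, same cost).

-- ===== PORT A =====
-- A: fold carrying (events so far, current accumulated run), final flush of the accumulator.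
def rain_events (rainfalls : List Int) : List Int :=
  let s := rainfalls.foldl
    (fun (st : List Int × Int) rain =>
      if rain > 0 then (st.1, st.2 + rain)
      else if st.2 > 0 then (st.1 ++ [st.2], 0) else st)
    ([], 0)
  if s.2 > 0 then s.1 ++ [s.2] else s.1

-- ===== PORT B =====
-- B: on a positive head, take the whole positive run (Source B's inner while / slice sum) and recurse past it.
def rain_events_alt : List Int → List Int
  | [] => []
  | x :: xs =>
    if 0 < x then
      (x + (xs.takeWhile (fun y => decide (0 < y))).sum)
        :: rain_events_alt (xs.dropWhile (fun y => decide (0 < y)))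
    else
      rain_events_alt xs
termination_by l => l.length
decreasing_by
  · exact Nat.lt_succ_of_le (List.length_dropWhile_le _ _)
  · simp

-- ===== PRECONDITION & SPEC =====
def Spec_rain_events (rainfalls : List Int) (out : List Int) : Prop := out = rain_events_alt rainfalls
instance (rainfalls : List Int) (out : List Int) : Decidable (Spec_rain_events rainfalls out) := by unfold Spec_rain_events; infer_instance

-- ===== CLAIM (what is proved, stated in full; the proofs are below) =====
def Claim_equal_rain_events : Prop := ∀ (rainfalls : List Int), Dom_rain_events rainfalls → Spec_rain_events rainfalls (rain_events rainfalls)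

-- ===== LEMMAS AND PROOFS =====

-- Reference recursion: events of the rest of the list given the current accumulated run c.
def evts (c : Int) : List Int → List Int
  | [] => if 0 < c then [c] else []
  | x :: xs => if 0 < x then evts (c + x) xs else if 0 < c then c :: evts 0 xs else evts 0 xs

lemma rain_events_fold (l : List Int) : ∀ (out : List Int) (c : Int), 0 ≤ c →
    (let s := l.foldl
      (fun (st : List Int × Int) rain =>
        if rain > 0 then (st.1, st.2 + rain)
        else if st.2 > 0 then (st.1 ++ [st.2], 0) else st)
      (out, c)
     if s.2 > 0 then s.1 ++ [s.2] else s.1) = out ++ evts c l := by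
  induction l with
  | nil =>
    intro out c hc
    simp only [List.foldl_nil, evts]
    split <;> simp_all
  | cons x xs ih =>
    intro out c hc
    simp only [List.foldl_cons, evts]
    by_cases hx : 0 < x
    · simp only [if_pos hx]
      have := ih out (c + x) (by omega)
      simpa using this
    · simp only [if_neg hx]
      by_cases hcpos : 0 < c
      · simp only [if_pos hcpos]
        have := ih (out ++ [c]) 0 le_rfl
        simpa [List.append_assoc] using this
      · have hc0 : c = 0 := by omega
        simp only [hc0]
        exact ih out 0 le_rfl

lemma evts_pos (xs : List Int) : ∀ c : Int, 0 < c →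
    evts c xs = (c + (xs.takeWhile (fun y => decide (0 < y))).sum)
        :: evts 0 (xs.dropWhile (fun y => decide (0 < y))) := by
  induction xs with
  | nil => intro c hc; simp [evts, hc]
  | cons x xs ih =>
    intro c hc
    by_cases hx : 0 < x
    · simp only [evts, if_pos hx, List.takeWhile, List.dropWhile, decide_eq_true hx]
      rw [ih (c + x) (by omega)]
      simp [add_assoc]
    · simp only [evts, if_neg hx, if_pos hc, List.takeWhile, List.dropWhile,
        decide_eq_false hx]
      simp

lemma alt_eq_evts (l : List Int) : rain_events_alt l = evts 0 l := by
  fun_induction rain_events_alt l with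
  | case1 => simp [evts]
  | case2 x xs hx ih =>
    rw [evts, if_pos hx, zero_add]
    rw [evts_pos xs x hx, ih]
  | case3 x xs hx ih =>
    rw [evts, if_neg hx]
    simp [ih]

-- ===== VERDICT (by name: the statement is the Claim_ definition above) =====
theorem rain_events_spec : Claim_equal_rain_events := by
  intro l _
  show rain_events l = rain_events_alt l
  rw [alt_eq_evts]
  have := rain_events_fold l [] 0 le_rfl
  simpa [rain_events] using this
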